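-- pv_equiv track=rewrite | github.com/JoelMoro/TFG | Scripts/GeneOrderCode.py | count_family
-- ===== SOURCE A (Python) =====
-- def count_family(cluster):
--     """
--     Returns a dictioanry with the number of times a protein family appears in a
--     given set of clusters
--     """
--     Count = {}
--     for sps in cluster:
--         visited = []
--         for pos in cluster[sps]:
--             if cluster[sps][pos] not in Count and cluster[sps][pos] not in visited:
--                 Count[cluster[sps][pos]] = 1
--                 visited.append(cluster[sps][pos])
--             elif cluster[sps][pos] in Count and cluster[sps][pos] not in visited:
--                 Count[cluster[sps][pos]] += 1
--                 visited.append(cluster[sps][pos])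
--
--     #If only appears once, color it white
--     for sps in cluster:
--         for pos in cluster[sps]:
--             if Count[cluster[sps][pos]] == 1:
--                 cluster[sps][pos] = "#ffffff"
--     return Count
-- ===== SOURCE B (Python) =====
-- def count_family(cluster):
--     """
--     Returns a dictionary with the number of times a protein family appears in a
--     given set of clusters
--     """
--     # family-major counting: list the distinct families in first-appearance order,
--     # then, for each family, count how many species' gene maps contain it
--     order = []
--     seen = set()
--     for sps in cluster:
--         for fam in cluster[sps].values():
--             if fam not in seen:
--                 seen.add(fam)
--                 order.append(fam)
--     value_sets = [set(cluster[sps].values()) for sps in cluster]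
--     Count = {fam: sum(fam in vs for vs in value_sets) for fam in order}
--
--     # If only appears once, color it white
--     for sps in cluster:
--         for pos in cluster[sps]:
--             if Count[cluster[sps][pos]] == 1:
--                 cluster[sps][pos] = "#ffffff"
--     return Count
-- ===== Notes on version B (the rewrite author's own statement) =====
-- stated objective: alternative
-- what changed: B transposes the counting: instead of A's species-major pass that increments a counter per position with a visited list, B first collects the distinct families in first-appearance order and the per-species family sets, then counts each family as the number of species sets containing it (a membership sum per family); the recoloring pass is unchanged.
import Mathlib
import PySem

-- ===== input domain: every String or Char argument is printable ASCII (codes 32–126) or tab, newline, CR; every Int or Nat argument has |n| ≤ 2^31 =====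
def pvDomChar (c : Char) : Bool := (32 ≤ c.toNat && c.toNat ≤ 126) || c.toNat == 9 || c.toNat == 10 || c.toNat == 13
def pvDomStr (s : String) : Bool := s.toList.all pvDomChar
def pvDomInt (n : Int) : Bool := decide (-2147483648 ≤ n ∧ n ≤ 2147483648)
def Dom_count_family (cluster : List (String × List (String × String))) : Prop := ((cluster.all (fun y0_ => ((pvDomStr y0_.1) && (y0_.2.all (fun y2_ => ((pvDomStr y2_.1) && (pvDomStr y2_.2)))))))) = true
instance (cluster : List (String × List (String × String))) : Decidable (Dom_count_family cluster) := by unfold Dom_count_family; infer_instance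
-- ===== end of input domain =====

-- B counts family-major (distinct families first, then one membership count per family over the
-- species) instead of A's species-major incrementing with a visited list; equivalence is about
-- the RETURN value: A also recolors the caller's dict in place (B's Python performs the same
-- mutation; it never affects the returned Count).

-- ===== PORT A =====
-- A's second Python loop only mutates the argument in place and never raises (every family it
-- looks up is a key of Count); it does not touch the returned Count, so the port returns Count.
def count_family (cluster : List (String × List (String × String))) : List (String × Int) :=
  let Count : PySem.Dict String Int :=
    cluster.foldl (fun Count sps =>
      let inner := (PySem.Dict.mk cluster).getD sps.1 []       -- cluster[sps]
      (inner.foldl (fun (st : PySem.Dict String Int × List String) pos =>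
          let fam := (PySem.Dict.mk inner).getD pos.1 ""       -- cluster[sps][pos]
          if !st.1.contains fam && !st.2.contains fam then
            (st.1.insert fam 1, st.2 ++ [fam])
          else if st.1.contains fam && !st.2.contains fam then
            (st.1.modify fam 0 (· + 1), st.2 ++ [fam])
          else st)
        (Count, ([] : List String))).1)
      PySem.Dict.empty
  Count.items

-- ===== PORT B =====
-- Source B's final recoloring loop is the same in-place mutation as A's; the returned Count is
-- ported. The (order, seen) pair is Source B's list + set; the dict comprehension is the
-- insert-fold over order; sum(bool for …) is the foldl adding 1 per membership hit.
def count_family_alt (cluster : List (String × List (String × String))) : List (String × Int) :=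
  let st :=
    cluster.foldl (fun (st : List String × PySem.Set String) sps =>
      let inner := (PySem.Dict.mk cluster).getD sps.1 []       -- cluster[sps]
      (PySem.Dict.mk inner).values.foldl (fun st fam =>
          if !(PySem.Set.contains st.2 fam) then (st.1 ++ [fam], PySem.Set.add st.2 fam)
          else st) st)
      (([] : List String), PySem.Set.empty)
  let valueSets : List (PySem.Set String) :=
    cluster.map (fun sps =>
      PySem.Set.ofList (PySem.Dict.mk ((PySem.Dict.mk cluster).getD sps.1 [])).values)
  let Count : PySem.Dict String Int :=
    st.1.foldl (fun d fam =>
      d.insert fam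
        (valueSets.foldl (fun (n : Int) vs =>
            n + (if PySem.Set.contains vs fam then 1 else 0)) 0))
      PySem.Dict.empty
  Count.items

-- ===== PRECONDITION & SPEC =====
-- Pre_ excludes association lists with duplicate keys (outer species keys or inner position
-- keys): such lists do not represent any Python dict, so A's first-match behaviour there is
-- accidental; every input coming from a real Python dict satisfies Pre_.
def Pre_count_family (cluster : List (String × List (String × String))) : Prop :=
  (cluster.map Prod.fst).Nodup ∧ ∀ p ∈ cluster, (p.2.map Prod.fst).Nodup
instance (cluster : List (String × List (String × String))) : Decidable (Pre_count_family cluster) := by unfold Pre_count_family; infer_instance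
def pvWitness_count_family : (List (String × List (String × String))) :=
  [("s1", [("p1", "f1"), ("p2", "f1"), ("p3", "f2")]), ("s2", [("p1", "f1")])]
def Spec_count_family (cluster : List (String × List (String × String))) (out : List (String × Int)) : Prop := out = count_family_alt cluster
instance (cluster : List (String × List (String × String))) (out : List (String × Int)) : Decidable (Spec_count_family cluster out) := by unfold Spec_count_family; infer_instance

-- ===== CLAIM (what is proved, stated in full; the proofs are below) =====
def Claim_equal_count_family : Prop := ∀ (cluster : List (String × List (String × String))), Dom_count_family cluster → Pre_count_family cluster → Spec_count_family cluster (count_family cluster)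

-- ===== LEMMAS AND PROOFS =====

-- the raw family values of one species' gene map
def valsOf (sps : String × List (String × String)) : List String := (PySem.Dict.mk sps.2).values

-- per-species deduplicated families, flattened over the whole cluster
def famStream (cluster : List (String × List (String × String))) : List String :=
  cluster.flatMap (fun sps => PySem.List.dedup (valsOf sps))

-- under Pre_, cluster[sps] is sps.2
theorem lookup_eq (cluster : List (String × List (String × String)))
    (hpre : Pre_count_family cluster) (sps : String × List (String × String))
    (hs : sps ∈ cluster) : (PySem.Dict.mk cluster).getD sps.1 [] = sps.2 := by
  apply PySem.Dict.getD_of_mem_items (PySem.Dict.mk cluster) (k := sps.1) (v := sps.2)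
    (by rw [Prod.mk.eta]; exact hs)
  simpa [PySem.Dict.keys] using hpre.1

-- first occurrences of vs that are not already in V, in order
def dedupE (vs V : List String) : List String :=
  match vs with
  | [] => []
  | v :: t => if V.contains v then dedupE t V else v :: dedupE t (V ++ [v])

theorem update_eq_append_dedupE (vs V : List String) :
    PySem.Set.update V vs = V ++ dedupE vs V := by
  induction vs generalizing V with
  | nil => simp [PySem.Set.update, dedupE]
  | cons v t ih =>
    rw [PySem.Set.update_cons, dedupE]
    by_cases hv : v ∈ V
    · simp [PySem.Set.add, hv, ih]
    · simp [PySem.Set.add, hv, ih]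

theorem dedupE_dedupE (vs V s : List String) (h : ∀ x ∈ V, x ∈ s) :
    dedupE (dedupE vs V) s = dedupE vs s := by
  induction vs generalizing V s with
  | nil => rfl
  | cons v t ih =>
    by_cases hv : v ∈ V
    · have h1 : V.contains v = true := by simpa using hv
      have h2 : s.contains v = true := by simpa using h v hv
      simp only [dedupE, h1, h2, if_true]
      exact ih V s h
    · have h1 : V.contains v = false := by simpa using hv
      by_cases hvs : v ∈ s
      · have h2 : s.contains v = true := by simpa using hvs
        simp only [dedupE, h1, h2, Bool.false_eq_true, if_false, if_true]
        exact ih (V ++ [v]) s (fun x hx => by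
          rcases List.mem_append.1 hx with h1' | h1'
          · exact h x h1'
          · rw [List.mem_singleton.1 h1']; exact hvs)
      · have h2 : s.contains v = false := by simpa using hvs
        simp only [dedupE, h1, h2, Bool.false_eq_true, if_false, List.cons.injEq, true_and]
        exact ih (V ++ [v]) (s ++ [v]) (fun x hx => by
          rcases List.mem_append.1 hx with h1' | h1'
          · exact List.mem_append.2 (Or.inl (h x h1'))
          · exact List.mem_append.2 (Or.inr h1'))

theorem dedup_eq_dedupE (vs : List String) : PySem.List.dedup vs = dedupE vs [] := by
  rw [PySem.List.dedup, ← PySem.Set.update_nil_left, update_eq_append_dedupE]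
  simp

theorem update_dedup (s vs : List String) :
    PySem.Set.update s (PySem.List.dedup vs) = PySem.Set.update s vs := by
  rw [update_eq_append_dedupE, update_eq_append_dedupE, dedup_eq_dedupE,
    dedupE_dedupE vs [] s (by simp)]

-- ---- A side: the counting fold is Counter(famStream) ----

theorem core_fold (vs : List String) (d : PySem.Dict String Int) (V : List String) :
    (vs.foldl (fun (st : PySem.Dict String Int × List String) fam =>
        if !st.1.contains fam && !st.2.contains fam then
          (st.1.insert fam 1, st.2 ++ [fam])
        else if st.1.contains fam && !st.2.contains fam then
          (st.1.modify fam 0 (· + 1), st.2 ++ [fam])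
        else st) (d, V)).1
    = (dedupE vs V).foldl (fun d fam => d.insert fam (d.getD fam 0 + 1)) d := by
  induction vs generalizing d V with
  | nil => rfl
  | cons v t ih =>
    rw [List.foldl_cons, dedupE]
    by_cases hv : V.contains v
    · simp only [hv, Bool.not_true, Bool.and_false, Bool.false_eq_true, if_false]
      exact ih d V
    · by_cases hc : d.contains v
      · simp only [hv, hc, Bool.not_false, Bool.not_true, Bool.and_true,
          Bool.false_eq_true, if_false, if_true, List.foldl_cons]
        rw [ih]
        rfl
      · simp only [hv, hc, Bool.not_false, Bool.true_and, if_true, Bool.false_eq_true, if_false,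
          List.foldl_cons]
        rw [ih]
        have h0 : d.getD v 0 = 0 := PySem.Dict.getD_of_not_contains d (k := v) 0 (by simpa using hc)
        rw [h0]
        norm_num

theorem inner_eq (inner : List (String × String)) (C : PySem.Dict String Int)
    (hnd : ((PySem.Dict.mk inner).keys).Nodup) :
    (inner.foldl (fun (st : PySem.Dict String Int × List String) pos =>
        let fam := (PySem.Dict.mk inner).getD pos.1 ""
        if !st.1.contains fam && !st.2.contains fam then
          (st.1.insert fam 1, st.2 ++ [fam])
        else if st.1.contains fam && !st.2.contains fam then
          (st.1.modify fam 0 (· + 1), st.2 ++ [fam])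
        else st) (C, ([] : List String))).1
    = (PySem.List.dedup (PySem.Dict.mk inner).values).foldl
        (fun C fam => C.insert fam (C.getD fam 0 + 1)) C := by
  rw [PySem.List.foldl_congr_mem inner _
      (fun (st : PySem.Dict String Int × List String) pos =>
        if !st.1.contains pos.2 && !st.2.contains pos.2 then
          (st.1.insert pos.2 1, st.2 ++ [pos.2])
        else if st.1.contains pos.2 && !st.2.contains pos.2 then
          (st.1.modify pos.2 0 (· + 1), st.2 ++ [pos.2])
        else st) _
      (by
        intro acc p hp
        have : (PySem.Dict.mk inner).getD p.1 "" = p.2 :=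
          PySem.Dict.getD_of_mem_items (PySem.Dict.mk inner) (k := p.1) (v := p.2) hp hnd ""
        simp only [this])]
  have hmap : (inner.foldl (fun (st : PySem.Dict String Int × List String) pos =>
        if !st.1.contains pos.2 && !st.2.contains pos.2 then
          (st.1.insert pos.2 1, st.2 ++ [pos.2])
        else if st.1.contains pos.2 && !st.2.contains pos.2 then
          (st.1.modify pos.2 0 (· + 1), st.2 ++ [pos.2])
        else st) (C, ([] : List String)))
      = ((inner.map Prod.snd).foldl (fun (st : PySem.Dict String Int × List String) fam =>
        if !st.1.contains fam && !st.2.contains fam then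
          (st.1.insert fam 1, st.2 ++ [fam])
        else if st.1.contains fam && !st.2.contains fam then
          (st.1.modify fam 0 (· + 1), st.2 ++ [fam])
        else st) (C, ([] : List String))) := by
    rw [List.foldl_map]
  rw [hmap, core_fold, dedup_eq_dedupE]
  rfl

theorem foldl_foldl_flatMap {α β γ : Type} (g : β → List γ) (f : α → γ → α)
    (L : List β) (init : α) :
    L.foldl (fun a b => (g b).foldl f a) init = (L.flatMap g).foldl f init := by
  induction L generalizing init with
  | nil => rfl
  | cons h t ih => simp [List.flatMap_cons, List.foldl_append, ih]

theorem A_eq (cluster : List (String × List (String × String)))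
    (hpre : Pre_count_family cluster) :
    count_family cluster = (PySem.Dict.counter (famStream cluster)).items := by
  unfold count_family
  dsimp only
  rw [PySem.List.foldl_congr_mem cluster _
      (fun (C : PySem.Dict String Int) sps =>
        (PySem.List.dedup (valsOf sps)).foldl (fun d fam => d.insert fam (d.getD fam 0 + 1)) C) _
      (by
        intro C sps hs
        dsimp only
        rw [lookup_eq cluster hpre sps hs]
        exact inner_eq sps.2 C (by simpa [PySem.Dict.keys] using hpre.2 sps hs))]
  rw [foldl_foldl_flatMap]
  rw [← famStream]
  rw [PySem.Dict.foldl_insert_getD_add_one_eq_counter]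

-- ---- B side: the (order, seen) pair and the membership sums ----

theorem pair_fold (vs s : List String) :
    vs.foldl (fun (st : List String × PySem.Set String) fam =>
        if !(PySem.Set.contains st.2 fam) then (st.1 ++ [fam], PySem.Set.add st.2 fam)
        else st) (s, s)
    = (PySem.Set.update s vs, PySem.Set.update s vs) := by
  induction vs generalizing s with
  | nil => simp [PySem.Set.update]
  | cons v t ih =>
    rw [List.foldl_cons, PySem.Set.update_cons]
    by_cases hv : v ∈ s
    · have hc : s.contains v = true := by simpa using hv
      have ha : PySem.Set.add s v = s := by simp [PySem.Set.add, hv]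
      rw [ha]
      simp only [PySem.Set.contains, hc, Bool.not_true, Bool.false_eq_true, if_false]
      exact ih s
    · have hc : s.contains v = false := by simpa using hv
      have ha : PySem.Set.add s v = s ++ [v] := by simp [PySem.Set.add, hv]
      rw [ha]
      simp only [PySem.Set.contains, hc, Bool.not_false, if_true]
      exact ih (s ++ [v])

theorem order_fold (L : List (String × List (String × String)))
    (valsB : (String × List (String × String)) → List String) (s : List String) :
    L.foldl (fun (st : List String × PySem.Set String) sps =>
        (valsB sps).foldl (fun st fam =>
          if !(PySem.Set.contains st.2 fam) then (st.1 ++ [fam], PySem.Set.add st.2 fam)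
          else st) st) (s, s)
    = (L.foldl (fun s sps => PySem.Set.update s (valsB sps)) s,
       L.foldl (fun s sps => PySem.Set.update s (valsB sps)) s) := by
  induction L generalizing s with
  | nil => rfl
  | cons h t ih =>
    simp only [List.foldl_cons]
    rw [pair_fold]
    exact ih _

theorem update_fold (L : List (String × List (String × String))) (s : List String) :
    L.foldl (fun s sps => PySem.Set.update s (valsOf sps)) s
    = PySem.Set.update s (famStream L) := by
  induction L generalizing s with
  | nil => simp [famStream, PySem.Set.update]
  | cons h t ih =>
    rw [List.foldl_cons, ih]
    show PySem.Set.update (PySem.Set.update s (valsOf h)) (famStream t)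
        = PySem.Set.update s (famStream (h :: t))
    rw [show famStream (h :: t) = PySem.List.dedup (valsOf h) ++ famStream t by
      simp [famStream, List.flatMap_cons]]
    rw [show PySem.Set.update s (PySem.List.dedup (valsOf h) ++ famStream t)
        = PySem.Set.update (PySem.Set.update s (PySem.List.dedup (valsOf h))) (famStream t) by
      simp [PySem.Set.update, List.foldl_append]]
    rw [update_dedup]

theorem cnt_eq (fam : String) (L : List (String × List (String × String))) (c : Int) :
    L.foldl (fun (n : Int) sps => n + (if (valsOf sps).contains fam then 1 else 0)) c
    = c + ((famStream L).count fam : Int) := by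
  induction L generalizing c with
  | nil => simp [famStream]
  | cons h t ih =>
    rw [List.foldl_cons, ih]
    have hone : ((PySem.List.dedup (valsOf h)).count fam : Int)
        = (if (valsOf h).contains fam then 1 else 0) := by
      by_cases hm : fam ∈ valsOf h
      · rw [List.count_eq_one_of_mem (PySem.List.nodup_dedup (valsOf h))
          (by simpa [PySem.List.mem_dedup] using hm)]
        simp [hm]
      · rw [List.count_eq_zero_of_not_mem (by simpa [PySem.List.mem_dedup] using hm)]
        simp [hm]
    rw [show famStream (h :: t) = PySem.List.dedup (valsOf h) ++ famStream t by
      simp [famStream, List.flatMap_cons]]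
    rw [List.count_append]
    push_cast
    rw [← hone]
    ring

theorem B_items_map (F : List String) (v : String → Int) :
    ((PySem.Set.ofList F).foldl (fun d fam => d.insert fam (v fam)) PySem.Dict.empty).items
    = (PySem.Set.ofList F).map (fun k => (k, v k)) := by
  rw [PySem.Dict.items_foldl_insert_fresh (PySem.Set.ofList F) (fun a => a) v PySem.Dict.empty
      (fun a _ => PySem.Dict.contains_empty a)
      (by simpa using PySem.Set.nodup_ofList F)]
  rw [show PySem.Dict.empty.items = ([] : List (String × Int)) from rfl]
  simp

set_option maxHeartbeats 1000000 in
theorem B_eq (cluster : List (String × List (String × String)))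
    (hpre : Pre_count_family cluster) :
    count_family_alt cluster
    = (PySem.Set.ofList (famStream cluster)).map
        (fun k => (k, ((famStream cluster).count k : Int))) := by
  show ((cluster.foldl (fun (st : List String × PySem.Set String) sps =>
      (PySem.Dict.mk ((PySem.Dict.mk cluster).getD sps.1 [])).values.foldl (fun st fam =>
          if !(PySem.Set.contains st.2 fam) then (st.1 ++ [fam], PySem.Set.add st.2 fam)
          else st) st) (([] : List String), PySem.Set.empty)).1.foldl
        (fun d fam => d.insert fam
          ((cluster.map (fun sps =>
              PySem.Set.ofList (PySem.Dict.mk ((PySem.Dict.mk cluster).getD sps.1 [])).values)).foldl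
            (fun (n : Int) vs => n + (if PySem.Set.contains vs fam then 1 else 0)) 0))
        PySem.Dict.empty).items
    = (PySem.Set.ofList (famStream cluster)).map
        (fun k => (k, ((famStream cluster).count k : Int)))
  have horder : (cluster.foldl (fun (st : List String × PySem.Set String) sps =>
        (PySem.Dict.mk ((PySem.Dict.mk cluster).getD sps.1 [])).values.foldl (fun st fam =>
          if !(PySem.Set.contains st.2 fam) then (st.1 ++ [fam], PySem.Set.add st.2 fam)
          else st) st) (([] : List String), PySem.Set.empty)).1
      = PySem.Set.ofList (famStream cluster) := by
    rw [PySem.List.foldl_congr_mem cluster _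
        (fun (st : List String × PySem.Set String) sps =>
          (valsOf sps).foldl (fun st fam =>
            if !(PySem.Set.contains st.2 fam) then (st.1 ++ [fam], PySem.Set.add st.2 fam)
            else st) st) _
        (by
          intro st sps hs
          dsimp only
          rw [lookup_eq cluster hpre sps hs]
          rfl)]
    rw [show (([] : List String), PySem.Set.empty) = (([] : List String), ([] : List String))
      from rfl]
    rw [order_fold cluster valsOf []]
    rw [update_fold, PySem.Set.update_nil_left]
  have hcnt : ∀ fam, (cluster.map (fun sps =>
          PySem.Set.ofList (PySem.Dict.mk ((PySem.Dict.mk cluster).getD sps.1 [])).values)).foldl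
        (fun (n : Int) vs => n + (if PySem.Set.contains vs fam then 1 else 0)) 0
      = ((famStream cluster).count fam : Int) := by
    intro fam
    have hb : ∀ vs : List String,
        PySem.Set.contains (PySem.Set.ofList vs) fam = vs.contains fam := by
      intro vs
      simp [PySem.Set.contains, PySem.Set.mem_ofList]
    rw [List.foldl_map]
    rw [PySem.List.foldl_congr_mem cluster _
        (fun (n : Int) sps => n + (if (valsOf sps).contains fam then 1 else 0)) _
        (by
          intro n sps hs
          rw [lookup_eq cluster hpre sps hs, hb]
          rfl)]
    rw [cnt_eq]
    ring
  conv_lhs => rw [horder]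
  refine Eq.trans (B_items_map (famStream cluster) _) ?_
  exact List.map_congr_left (fun k _ => by rw [hcnt k])

-- ===== VERDICT (by name: the statement is the Claim_ definition above) =====
theorem count_family_spec : Claim_equal_count_family := by
  unfold Claim_equal_count_family
  intro cluster _ hpre
  unfold Spec_count_family
  rw [A_eq cluster hpre, B_eq cluster hpre, PySem.Dict.items_counter]
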